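-- pv_equiv track=rewrite | github.com/pypi-data/pypi-mirror-404 | packages/numthy/numthy-0.1.0.tar.gz/numthy-0.1.0/tests/test_lattices.py | _brute_force_roots
-- ===== SOURCE A (Python) =====
-- import itertools
--
-- def _poly_eval_int(
--     coefficients: dict[tuple[int, ...], int],
--     x: tuple[int, ...],
--     mod: int,
-- ) -> int:
--     total = 0
--     for monomial, c in coefficients.items():
--         term = c
--         for x_i, e in zip(x, monomial):
--             term *= pow(x_i, e)
--         total += term
--     return total % mod
--
-- def _brute_force_roots(
--     coefficients: dict[tuple[int, ...], int],
--     bounds: tuple[int, ...],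
--     mod: int,
-- ) -> list[tuple[int, ...]]:
--     ranges = [range(-b + 1, b) for b in bounds]
--     roots = []
--     for point in itertools.product(*ranges):
--         if _poly_eval_int(coefficients, point, mod) == 0:
--             roots.append(point)
--     return sorted(roots)
-- ===== SOURCE B (Python) =====
-- def _brute_force_roots(coefficients, bounds, mod):
--     # Recursive descent: substitute one coordinate at a time, reducing the
--     # polynomial to the remaining variables; mod is applied only at the leaf.
--     if any(b <= 0 for b in bounds):  # empty search box
--         return []
--
--     def descend(terms, bs):
--         if not bs:
--             return [()] if sum(c for _, c in terms) % mod == 0 else []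
--         points = []
--         for v in range(-bs[0] + 1, bs[0]):
--             reduced = [(mon[1:], c * v ** (mon[0] if mon else 0)) for mon, c in terms]
--             for tail in descend(reduced, bs[1:]):
--                 points.append((v,) + tail)
--         return points
--
--     return descend(list(coefficients.items()), list(bounds))
-- ===== Notes on version B (the rewrite author's own statement) =====
-- stated objective: alternative
-- what changed: Replaced the flat itertools.product enumeration with full per-point polynomial re-evaluation (plus a final sort) by a recursive descent that substitutes one coordinate per level, carrying a reduced term list downward and testing only the accumulated constant modulo mod at the leaf, emitting roots directly in sorted (lexicographic) order.
import Mathlib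
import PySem

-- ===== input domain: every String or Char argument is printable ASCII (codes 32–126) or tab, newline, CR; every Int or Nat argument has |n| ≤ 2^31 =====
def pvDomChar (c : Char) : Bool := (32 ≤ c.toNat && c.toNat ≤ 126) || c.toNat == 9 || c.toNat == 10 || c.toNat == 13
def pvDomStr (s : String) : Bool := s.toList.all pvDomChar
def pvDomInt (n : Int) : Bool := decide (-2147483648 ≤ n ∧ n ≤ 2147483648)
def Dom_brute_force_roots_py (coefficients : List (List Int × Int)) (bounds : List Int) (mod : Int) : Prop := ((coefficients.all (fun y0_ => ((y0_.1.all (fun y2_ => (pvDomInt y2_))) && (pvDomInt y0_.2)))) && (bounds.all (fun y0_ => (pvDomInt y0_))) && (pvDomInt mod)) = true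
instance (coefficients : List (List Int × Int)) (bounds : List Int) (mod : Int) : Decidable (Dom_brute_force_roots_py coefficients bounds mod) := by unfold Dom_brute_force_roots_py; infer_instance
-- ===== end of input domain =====

-- B replaces the flat product enumeration + per-point re-evaluation (+ sort) by a
-- recursive coordinate-by-coordinate substitution that emits roots already in order
-- (objective: alternative decomposition, similar cost).

-- ===== PORT A =====
-- itertools.product(*ranges), ported by hand: exact nested-loop (lexicographic) order
def pvProduct : List (List Int) → List (List Int)
  | [] => [[]]
  | r :: rs => r.flatMap (fun v => (pvProduct rs).map (fun p => v :: p))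

-- _poly_eval_int, step for step (pow: exponent is ≥ 0 under Pre_, so x ^ e.toNat is exact)
def poly_eval_int (coefficients : List (List Int × Int)) (x : List Int) (mod : Int) : Int :=
  PySem.Int.mod
    (coefficients.foldl
      (fun total mc =>
        total + (List.zip x mc.1).foldl (fun term xe => term * xe.1 ^ xe.2.toNat) mc.2)
      0) mod

def brute_force_roots_py (coefficients : List (List Int × Int)) (bounds : List Int) (mod : Int) : List (List Int) :=
  let ranges := bounds.map (fun b => PySem.List.pyRange (-b + 1) b 1)
  let roots := (pvProduct ranges).foldl
    (fun roots point => if poly_eval_int coefficients point mod == 0 then roots ++ [point] else roots) []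
  PySem.List.sorted roots (fun x => x) false

-- ===== PORT B =====
-- substitute v for the first variable: each term (mon, c) becomes (mon[1:], c * v ** mon[0])
def pvSubst (terms : List (List Int × Int)) (v : Int) : List (List Int × Int) :=
  terms.map (fun mc => (mc.1.tail, mc.2 * v ^ (mc.1.headD 0).toNat))

def pvDescend (mod : Int) : List (List Int × Int) → List Int → List (List Int)
  | terms, [] =>
      if PySem.Int.mod (terms.foldl (fun s mc => s + mc.2) 0) mod == 0 then [[]] else []
  | terms, b :: bs =>
      (PySem.List.pyRange (-b + 1) b 1).foldl
        (fun points v => points ++ (pvDescend mod (pvSubst terms v) bs).map (fun t => v :: t)) []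

def brute_force_roots_py_alt (coefficients : List (List Int × Int)) (bounds : List Int) (mod : Int) : List (List Int) :=
  if bounds.any (fun b => b ≤ 0) then []   -- empty search box
  else pvDescend mod coefficients bounds

-- ===== PRECONDITION & SPEC =====
-- Pre_ excludes exactly where Python A does not return an int result: when the box is nonempty
-- (every bound ≥ 1, so a point gets evaluated), mod = 0 raises ZeroDivisionError and a negative
-- exponent in a used position makes pow leave the integers or raise ZeroDivisionError at 0.
def Pre_brute_force_roots_py (coefficients : List (List Int × Int)) (bounds : List Int) (mod : Int) : Prop :=
  (∀ b ∈ bounds, 1 ≤ b) →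
    (mod ≠ 0 ∧ ∀ mc ∈ coefficients, ∀ e ∈ mc.1.take bounds.length, 0 ≤ e)
instance (coefficients : List (List Int × Int)) (bounds : List Int) (mod : Int) : Decidable (Pre_brute_force_roots_py coefficients bounds mod) := by unfold Pre_brute_force_roots_py; infer_instance

def pvWitness_brute_force_roots_py : (List (List Int × Int)) × List Int × Int :=
  ([([2, 1], 1), ([0, 1], 3), ([], -4)], [3, 2], 5)

def Spec_brute_force_roots_py (coefficients : List (List Int × Int)) (bounds : List Int) (mod : Int) (out : List (List Int)) : Prop := out = brute_force_roots_py_alt coefficients bounds mod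
instance (coefficients : List (List Int × Int)) (bounds : List Int) (mod : Int) (out : List (List Int)) : Decidable (Spec_brute_force_roots_py coefficients bounds mod out) := by unfold Spec_brute_force_roots_py; infer_instance

-- ===== CLAIM (what is proved, stated in full; the proofs are below) =====
def Claim_equal_brute_force_roots_py : Prop := ∀ (coefficients : List (List Int × Int)) (bounds : List Int) (mod : Int), Dom_brute_force_roots_py coefficients bounds mod → Pre_brute_force_roots_py coefficients bounds mod → Spec_brute_force_roots_py coefficients bounds mod (brute_force_roots_py coefficients bounds mod)

-- ===== LEMMAS AND PROOFS =====

-- evaluating the substituted term list = evaluating the original at v :: x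
theorem pvSubst_eval (terms : List (List Int × Int)) (v : Int) (x : List Int) (mod : Int) :
    poly_eval_int (pvSubst terms v) x mod = poly_eval_int terms (v :: x) mod := by
  unfold poly_eval_int pvSubst
  rw [List.foldl_map]
  congr 1
  apply PySem.List.foldl_congr_mem
  intro acc mc _
  rcases mc with ⟨mon, c⟩
  cases mon with
  | nil => simp
  | cons e mt => simp [List.zip_cons_cons]

-- the recursive descent is exactly "filter the lexicographic product"
theorem pvDescend_eq (mod : Int) : ∀ (bs : List Int) (terms : List (List Int × Int)),
    pvDescend mod terms bs =
      (pvProduct (bs.map (fun b => PySem.List.pyRange (-b + 1) b 1))).filter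
        (fun p => poly_eval_int terms p mod == 0) := by
  intro bs
  induction bs with
  | nil =>
      intro terms
      have hev : poly_eval_int terms [] mod = PySem.Int.mod (terms.foldl (fun s mc => s + mc.2) 0) mod := by
        rfl
      simp only [pvDescend, pvProduct, List.map_nil]
      cases h : (PySem.Int.mod (terms.foldl (fun s mc => s + mc.2) 0) mod == 0) <;>
        simp [List.filter, hev, h]
  | cons b bs ih =>
      intro terms
      simp only [pvDescend, pvProduct, List.map_cons]
      rw [PySem.List.foldl_append_eq_flatMap, List.nil_append, List.filter_flatMap]
      congr 1
      funext v
      rw [ih (pvSubst terms v), List.filter_map]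
      congr 1
      apply List.filter_congr
      intro p _
      simp only [Function.comp]
      rw [pvSubst_eval]

-- the product of strictly increasing ranges is strictly increasing in the list order
theorem pvProduct_pairwise : ∀ (rs : List (List Int)),
    (∀ r ∈ rs, r.Pairwise (· < ·)) → (pvProduct rs).Pairwise (· < ·) := by
  intro rs
  induction rs with
  | nil => intro _; simp [pvProduct]
  | cons r rest ih =>
      intro h
      have hrest : (pvProduct rest).Pairwise (· < ·) := ih (fun l hl => h l (List.mem_cons_of_mem _ hl))
      have hr : r.Pairwise (· < ·) := h r List.mem_cons_self
      simp only [pvProduct, List.flatMap]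
      rw [List.pairwise_flatten]
      constructor
      · intro l hl
        simp only [List.mem_map] at hl
        obtain ⟨v, _, rfl⟩ := hl
        exact List.Pairwise.map _ (fun {p q} hpq => List.cons_lt_cons_iff.mpr (Or.inr ⟨rfl, hpq⟩)) hrest
      · apply List.Pairwise.map
        · intro v w hvw x hx y hy
          simp only [List.mem_map] at hx hy
          obtain ⟨p, _, rfl⟩ := hx
          obtain ⟨q, _, rfl⟩ := hy
          exact List.cons_lt_cons_iff.mpr (Or.inl hvw)
        · exact hr

theorem pvProduct_nil_of_mem_nil : ∀ (rs : List (List Int)), [] ∈ rs → pvProduct rs = [] := by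
  intro rs
  induction rs with
  | nil => intro h; cases h
  | cons r rest ih =>
      intro h
      rcases List.mem_cons.mp h with h1 | h2
      · simp [pvProduct, ← h1]
      · simp [pvProduct, ih h2]

-- ===== VERDICT (by name: the statement is the Claim_ definition above) =====
theorem brute_force_roots_py_spec : Claim_equal_brute_force_roots_py := by
  intro coefficients bounds mod _ _
  unfold Spec_brute_force_roots_py brute_force_roots_py brute_force_roots_py_alt
  simp only []
  have hfold := PySem.List.foldl_append_if (fun point => poly_eval_int coefficients point mod == 0)
    (id : List Int → List Int) (pvProduct (bounds.map (fun b => PySem.List.pyRange (-b + 1) b 1))) []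
  simp only [id, List.map_id, List.nil_append] at hfold
  rw [hfold]
  by_cases hneg : bounds.any (fun b => b ≤ 0)
  · -- some bound b ≤ 0: its range is empty, so the product — hence both sides — is empty
    simp only [hneg, if_true]
    obtain ⟨b, hb, hble⟩ := List.any_eq_true.mp hneg
    have hb0 : b ≤ 0 := by simpa using hble
    have : ([] : List Int) ∈ bounds.map (fun b => PySem.List.pyRange (-b + 1) b 1) := by
      refine List.mem_map.mpr ⟨b, hb, ?_⟩
      exact PySem.List.pyRange_one_eq_nil (by omega)
    rw [pvProduct_nil_of_mem_nil _ this]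
    rfl
  · simp only [hneg, Bool.false_eq_true, if_false]
    rw [pvDescend_eq]
    have hp : (List.filter (fun point => poly_eval_int coefficients point mod == 0)
        (pvProduct (List.map (fun b => PySem.List.pyRange (-b + 1) b 1) bounds))).Pairwise
        (fun a b => (fun x => x) a < (fun x => x) b) := by
      apply List.Pairwise.filter
      apply pvProduct_pairwise
      intro r hr
      simp only [List.mem_map] at hr
      obtain ⟨bb, _, rfl⟩ := hr
      exact PySem.List.pairwise_lt_pyRange_one _ _
    convert PySem.List.sorted_eq_of_perm_of_pairwise_lt _ _ _ (List.Perm.refl _) hp using 2
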